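-- pv_equiv track=rewrite | github.com/brange/advent-of-code-python | 2020/day6.py | part1
-- ===== SOURCE A (Python) =====
-- def part1(data):
--     groups = list()
--     yes_in_group = set()
--     groups.append(yes_in_group)
--     for row in data:
--         if row == '':
--             yes_in_group = set()
--             groups.append(yes_in_group)
--         else:
--             for q in row:
--                 yes_in_group.add(q)
--
--     part1 = 0
--     for group in groups:
--         part1 += len(group)
--
--     return part1
-- ===== SOURCE B (Python) =====
-- def part1(data):
--     # Split the rows into blank-separated groups up front, then count each
--     # group's distinct questions by sorting its concatenated answers and
--     # counting runs of equal adjacent characters -- no sets at all.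
--     total = 0
--     rest = data
--     while rest:
--         k = rest.index('') if '' in rest else len(rest)
--         cs = sorted(''.join(rest[:k]))
--         total += (1 + sum(x != y for x, y in zip(cs, cs[1:]))) if cs else 0
--         rest = rest[k + 1:]
--     return total
-- ===== Notes on version B (the rewrite author's own statement) =====
-- stated objective: alternative
-- what changed: B replaces A's incremental per-group hash sets (built row by row and summed in a second pass) by splitting the rows into blank-separated groups via index/slicing and counting each group's distinct questions by sorting the concatenated answers and counting runs of equal adjacent characters.
import Mathlib
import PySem

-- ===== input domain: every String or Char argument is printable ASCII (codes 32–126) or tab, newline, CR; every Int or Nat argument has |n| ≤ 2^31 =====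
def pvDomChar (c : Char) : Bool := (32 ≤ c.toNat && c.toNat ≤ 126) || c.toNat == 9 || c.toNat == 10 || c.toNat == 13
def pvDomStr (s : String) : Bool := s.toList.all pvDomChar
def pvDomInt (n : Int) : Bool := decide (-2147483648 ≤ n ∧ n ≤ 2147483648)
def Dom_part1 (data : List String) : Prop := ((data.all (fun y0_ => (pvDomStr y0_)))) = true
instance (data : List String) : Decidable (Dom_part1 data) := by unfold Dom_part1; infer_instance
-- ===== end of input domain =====

-- B splits the rows into blank-separated groups by index/slicing and counts each group's
-- distinct questions by sorting the concatenated answers and counting runs, instead of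
-- A's incrementally built per-group sets summed in a second pass (objective: alternative).


-- ===== PORT A =====
-- Python's mutable aliasing (yes_in_group is the last element of groups) is modelled by
-- keeping the completed groups and the current set separately; the final list of groups
-- is done ++ [cur].
def part1StepA (st : List (PySem.Set Char) × PySem.Set Char) (row : String) :
    List (PySem.Set Char) × PySem.Set Char :=
  if row = "" then (st.1 ++ [st.2], PySem.Set.empty)
  else (st.1, row.toList.foldl PySem.Set.add st.2)

def part1 (data : List String) : Int :=
  let st := data.foldl part1StepA ([], PySem.Set.empty)
  let groups := st.1 ++ [st.2]
  groups.foldl (fun s g => s + (PySem.Set.len g : Int)) 0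

-- ===== PORT B =====
-- (1 + sum(x != y for x, y in zip(cs, cs[1:]))) if cs else 0;  cs[1:] is PySem.List.slice
def part1RunsB (cs : List Char) : Int :=
  if cs ≠ [] then
    1 + (cs.zip (PySem.List.slice cs (some 1) none)).foldl
          (fun s p => s + (if p.1 ≠ p.2 then 1 else 0)) 0
  else 0

-- the while loop over 'rest': rest.index('') if '' in rest else len(rest); slices rest[:k], rest[k+1:]
def part1GoB (rest : List String) (total : Int) : Int :=
  if h : rest ≠ [] then
    let k : Nat := (PySem.List.index? rest "").getD rest.length
    let cs := PySem.List.sorted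
        (PySem.Str.join "" (PySem.List.slice rest none (some (k : Int)))).toList
        (fun c => c) false
    part1GoB (PySem.List.slice rest (some ((k : Int) + 1)) none) (total + part1RunsB cs)
  else total
termination_by rest.length
decreasing_by
  rw [PySem.List.slice_from rest (by omega)]
  simp only [List.length_drop]
  have : 0 < rest.length := List.length_pos_iff.mpr h
  omega

def part1_alt (data : List String) : Int := part1GoB data 0

-- ===== PRECONDITION & SPEC =====
def Spec_part1 (data : List String) (out : Int) : Prop := out = part1_alt data
instance (data : List String) (out : Int) : Decidable (Spec_part1 data out) := by unfold Spec_part1; infer_instance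

-- ===== CLAIM (what is proved, stated in full; the proofs are below) =====
def Claim_equal_part1 : Prop := ∀ (data : List String), Dom_part1 data → Spec_part1 data (part1 data)

-- ===== LEMMAS AND PROOFS =====

-- folding one row's characters into the current set (A's inner loop)
def addRow (s : PySem.Set Char) (r : String) : PySem.Set Char :=
  r.toList.foldl PySem.Set.add s

-- structural form of A's single pass: sum of the distinct-counts of the groups
def fA : List String → PySem.Set Char → Int
  | [], cur => (PySem.Set.len cur : Int)
  | r :: rs, cur =>
      if r = "" then (PySem.Set.len cur : Int) + fA rs PySem.Set.empty
      else fA rs (addRow cur r)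

def sumLen (acc : Int) (gs : List (PySem.Set Char)) : Int :=
  gs.foldl (fun s g => s + (PySem.Set.len g : Int)) acc

theorem sumLen_append (acc : Int) (gs hs : List (PySem.Set Char)) :
    sumLen acc (gs ++ hs) = sumLen (sumLen acc gs) hs := by
  simp [sumLen, List.foldl_append]

theorem part1_eq_fA_aux (rest : List String) (done : List (PySem.Set Char))
    (cur : PySem.Set Char) :
    (let st := rest.foldl part1StepA (done, cur)
     sumLen 0 (st.1 ++ [st.2])) = sumLen 0 done + fA rest cur := by
  induction rest generalizing done cur with
  | nil =>
      simp only [List.foldl_nil, fA]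
      rw [sumLen_append]; simp [sumLen]
  | cons r rs ih =>
      simp only [List.foldl_cons, part1StepA, fA]
      by_cases h : r = ""
      · simp only [if_pos h]
        rw [ih, sumLen_append]
        simp [sumLen]; ring
      · simp only [if_neg h]
        exact ih done (addRow cur r)

theorem part1_eq_fA (data : List String) :
    part1 data = fA data PySem.Set.empty := by
  have := part1_eq_fA_aux data [] PySem.Set.empty
  simpa [part1, sumLen] using this

-- skipping a run of non-blank rows in fA
theorem fA_group (g rest : List String) (cur : PySem.Set Char)
    (hg : ∀ r ∈ g, r ≠ "") :
    fA (g ++ rest) cur = fA rest (g.foldl addRow cur) := by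
  induction g generalizing cur with
  | nil => simp
  | cons r t ih =>
      have hr : r ≠ "" := hg r (by simp)
      simp only [List.cons_append, fA, if_neg hr, List.foldl_cons]
      exact ih _ (fun x hx => hg x (by simp [hx]))

-- a group's char-fold is Set.ofList of the concatenated characters
theorem foldl_addRow_eq_ofList (g : List String) (s : PySem.Set Char) :
    g.foldl addRow s = ((g.map String.toList).flatten).foldl PySem.Set.add s := by
  induction g generalizing s with
  | nil => simp
  | cons r t ih => simp [addRow, List.foldl_append, ih]

-- ''.join with empty separator is concatenation
theorem join_nil_eq_flatten (ls : List (List Char)) :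
    PySem.Chars.join [] ls = ls.flatten := by
  induction ls with
  | nil => simp [PySem.Chars.join_nil]
  | cons p rest ih =>
      cases rest with
      | nil => simp [PySem.Chars.join_singleton]
      | cons q t => rw [PySem.Chars.join_cons_cons]; simp_all

theorem join_empty_toList (g : List String) :
    (PySem.Str.join "" g).toList = (g.map String.toList).flatten := by
  rw [PySem.Str.toList_join]
  have : ("" : String).toList = [] := rfl
  rw [this, join_nil_eq_flatten]

-- run count of the while-loop body as a structural recursion
def runsRec : List Char → Int
  | [] => 0
  | [_] => 1
  | a :: b :: t => (if a = b then 0 else 1) + runsRec (b :: t)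

theorem runs_sum_aux (a : Char) (t : List Char) :
    1 + (((a :: t).zip t).map
          (fun p => if p.1 ≠ p.2 then (1 : Int) else 0)).sum = runsRec (a :: t) := by
  induction t generalizing a with
  | nil => simp [runsRec]
  | cons b u ih =>
      simp only [List.zip_cons_cons, List.map_cons, List.sum_cons, runsRec]
      rw [← ih b]
      by_cases h : a = b <;> simp [h]

theorem part1RunsB_eq_runsRec (cs : List Char) : part1RunsB cs = runsRec cs := by
  cases cs with
  | nil => simp [part1RunsB, runsRec]
  | cons a t =>
      simp only [part1RunsB, if_pos (by simp : (a :: t) ≠ []),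
        PySem.List.slice_from_one, List.tail_cons]
      rw [PySem.List.foldl_add (((a :: t).zip t))
        (fun p => if p.1 ≠ p.2 then (1 : Int) else 0) 0, zero_add]
      exact runs_sum_aux a t

-- on a sorted list, the run count is the number of distinct elements
theorem runsRec_sorted (cs : List Char) (h : cs.Pairwise (· ≤ ·)) :
    runsRec cs = (cs.toFinset.card : Int) := by
  induction cs with
  | nil => simp [runsRec]
  | cons a t ih =>
      cases t with
      | nil => simp [runsRec]
      | cons b u =>
          have htail : (b :: u).Pairwise (· ≤ ·) := h.of_cons
          have hab : a ≤ b := (List.pairwise_cons.mp h).1 b (by simp)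
          by_cases hEq : a = b
          · subst hEq
            rw [runsRec, if_pos rfl, ih htail]
            simp [List.toFinset_cons]
          · have hnot : a ∉ insert b u.toFinset := by
              simp only [Finset.mem_insert, List.mem_toFinset]
              rintro (rfl | hmem)
              · exact hEq rfl
              · have hba : b ≤ a := (List.pairwise_cons.mp htail).1 a (by simp [hmem])
                exact hEq (le_antisymm hab hba)
            rw [runsRec, if_neg hEq, ih htail]
            simp only [List.toFinset_cons]
            rw [Finset.card_insert_of_notMem hnot]
            push_cast
            ring

theorem setLen_eq_card (l : List Char) :
    (PySem.Set.len (l.foldl PySem.Set.add PySem.Set.empty) : Int) = (l.toFinset.card : Int) := by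
  rw [show l.foldl PySem.Set.add PySem.Set.empty = PySem.Set.ofList l from
    (PySem.Set.ofList_eq_foldl l).symm]
  have hfin : (PySem.Set.ofList l).toFinset = l.toFinset := by
    ext x; simp [List.mem_toFinset, PySem.Set.mem_ofList]
  have hlen : (PySem.Set.ofList l).toFinset.card = (PySem.Set.ofList l).length :=
    List.toFinset_card_of_nodup (PySem.Set.nodup_ofList l)
  rw [← hfin, hlen]
  simp [PySem.Set.len]

-- the group's distinct count, both ways
theorem group_count (g : List String) :
    part1RunsB (PySem.List.sorted
        (PySem.Str.join "" g).toList (fun c => c) false)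
      = (PySem.Set.len (g.foldl addRow PySem.Set.empty) : Int) := by
  set cat := (PySem.Str.join "" g).toList with hcat
  have hsortedP : (PySem.List.sorted cat (fun c => c) false).Pairwise (· ≤ ·) := by
    have := PySem.List.sorted_pairwise cat (fun c => c)
    simpa using this
  rw [part1RunsB_eq_runsRec, runsRec_sorted _ hsortedP]
  have hperm : (PySem.List.sorted cat (fun c => c) false).Perm cat :=
    PySem.List.sorted_perm cat (fun c => c) false
  rw [List.toFinset_eq_of_perm _ _ hperm]
  rw [foldl_addRow_eq_ofList, setLen_eq_card]
  rw [hcat, join_empty_toList]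

theorem fA_nil_len (cur : PySem.Set Char) : fA [] cur = (PySem.Set.len cur : Int) := rfl

theorem part1GoB_eq_fA_aux : ∀ (n : Nat) (rest : List String) (total : Int),
    rest.length ≤ n → part1GoB rest total = total + fA rest PySem.Set.empty := by
  intro n
  induction n with
  | zero =>
      intro rest total hle
      have : rest = [] := List.length_eq_zero_iff.mp (Nat.le_zero.mp hle)
      subst this
      simp [part1GoB, fA, PySem.Set.len, PySem.Set.empty]
  | succ n ih =>
      intro rest total hle
      by_cases hne : rest = []
      · subst hne; simp [part1GoB, fA, PySem.Set.len, PySem.Set.empty]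
      rw [part1GoB, dif_pos hne]
      cases hidx : PySem.List.index? rest "" with
      | some k =>
          obtain ⟨pre, suf, hsplit, hklen, hnotin⟩ :=
            (PySem.List.index?_eq_some_iff rest "" k).mp hidx
          have hk0 : (0 : Int) ≤ (k : Int) := by positivity
          have htake : PySem.List.slice rest none (some ((k : Nat) : Int)) = pre := by
            rw [PySem.List.slice_to rest hk0, Int.toNat_natCast, hsplit, ← hklen,
              List.take_left]
          have hdrop : PySem.List.slice rest (some (((k : Nat) : Int) + 1)) none = suf := by
            rw [PySem.List.slice_from rest (by omega)]
            have : (((k : Nat) : Int) + 1).toNat = k + 1 := by omega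
            rw [this, hsplit, show pre ++ "" :: suf = (pre ++ [""]) ++ suf by simp]
            exact List.drop_left' (by simp [hklen])
          simp only [Option.getD_some, htake, hdrop]
          have hsuf : suf.length ≤ n := by
            have := congrArg List.length hsplit
            simp at this
            omega
          rw [ih suf _ hsuf]
          have hpre : ∀ r ∈ pre, r ≠ "" := fun r hr h0 => hnotin (h0 ▸ hr)
          rw [hsplit, fA_group pre ("" :: suf) PySem.Set.empty hpre]
          show _ = total + fA ("" :: suf) _
          rw [show fA ("" :: suf) (pre.foldl addRow PySem.Set.empty)
              = (PySem.Set.len (pre.foldl addRow PySem.Set.empty) : Int)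
                + fA suf PySem.Set.empty from by simp [fA]]
          rw [group_count]
          ring
      | none =>
          have hnotin : "" ∉ rest := (PySem.List.index?_eq_none_iff rest "").mp hidx
          have htake : PySem.List.slice rest none (some ((rest.length : Nat) : Int)) = rest := by
            rw [PySem.List.slice_to rest (by positivity), Int.toNat_natCast, List.take_length]
          have hdrop : PySem.List.slice rest (some (((rest.length : Nat) : Int) + 1)) none = ([] : List String) := by
            rw [PySem.List.slice_from rest (by positivity)]
            apply List.drop_eq_nil_of_le
            omega
          simp only [Option.getD_none, htake, hdrop]
          rw [ih [] _ (by simp)]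
          have hpre : ∀ r ∈ rest, r ≠ "" := fun r hr h0 => hnotin (h0 ▸ hr)
          rw [show rest = rest ++ [] by simp, fA_group rest [] PySem.Set.empty hpre,
            fA_nil_len, group_count]
          simp [fA, PySem.Set.len]

theorem part1GoB_eq_fA (rest : List String) (total : Int) :
    part1GoB rest total = total + fA rest PySem.Set.empty :=
  part1GoB_eq_fA_aux rest.length rest total le_rfl

-- ===== VERDICT (by name: the statement is the Claim_ definition above) =====
theorem part1_spec : Claim_equal_part1 := by
  intro data _
  unfold Spec_part1 part1_alt
  rw [part1_eq_fA, part1GoB_eq_fA]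
  omega
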